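-- pv_equiv track=rewrite | github.com/ozr2117-design/YX | app.py | render_units
-- ===== SOURCE A (Python) =====
-- import math
--
-- def render_units(n):
--     frames = max(1, math.ceil(n / 10))
--     if n == 0: frames = 1
--     html = "<div class='ten-frame-wrapper'>"
--     drawn = 0
--     for _ in range(frames):
--         html += "<div class='ten-frame'>"
--         for _ in range(10):
--             c = "circle active" if drawn < n else "circle"
--             html += f"<div class='{c}'></div>"
--             drawn += 1
--         html += "</div>"
--     html += "</div>"
--     return html
-- ===== SOURCE B (Python) =====
-- def render_units(n):
--     # count-then-chunk: compute the active count up front, build the flat cell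
--     # list, then wrap each group of 10 in a ten-frame div
--     frames = max(1, -((-n) // 10))
--     total = frames * 10
--     active = max(0, min(total, n))
--     cells = (["<div class='circle active'></div>"] * active
--              + ["<div class='circle'></div>"] * (total - active))
--     body = "".join(
--         "<div class='ten-frame'>" + "".join(cells[10 * k:10 * k + 10]) + "</div>"
--         for k in range(frames))
--     return "<div class='ten-frame-wrapper'>" + body + "</div>"
-- ===== Notes on version B (the rewrite author's own statement) =====
-- stated objective: alternative
-- what changed: Replaces A's per-circle running 'drawn' counter with its inner conditional by a count-then-chunk layout: compute the active count in closed form (clamp of n into the grid size), build the flat cell list by replication, and wrap each group of ten cells in a ten-frame div.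
import Mathlib
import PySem

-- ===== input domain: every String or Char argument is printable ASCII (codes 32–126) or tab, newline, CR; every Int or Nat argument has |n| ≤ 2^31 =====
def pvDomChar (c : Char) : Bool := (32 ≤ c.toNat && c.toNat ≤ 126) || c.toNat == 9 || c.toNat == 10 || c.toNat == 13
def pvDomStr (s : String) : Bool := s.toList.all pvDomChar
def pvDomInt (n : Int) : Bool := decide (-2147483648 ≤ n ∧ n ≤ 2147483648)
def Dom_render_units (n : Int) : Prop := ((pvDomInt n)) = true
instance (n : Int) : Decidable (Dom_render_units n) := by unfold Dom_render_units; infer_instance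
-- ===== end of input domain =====

-- B builds the ten-frame HTML by a count-then-chunk decomposition (compute the
-- active count up front, build the flat cell list, chunk it 10 at a time)
-- instead of A's per-circle conditional on a running `drawn` counter.

-- ===== PORT A =====
-- math.ceil(n / 10) is ported as -((-n) // 10); exact on the stated domain
-- (|n| ≤ 2^31), where the float n/10 never rounds across an integer boundary.
def render_units (n : Int) : String :=
  let frames0 : Int := max 1 (-(PySem.Int.floordiv (-n) 10))
  let frames : Int := if n == 0 then 1 else frames0
  let st : String × Int :=
    (PySem.List.pyRange 0 frames 1).foldl
      (fun st _ =>
        let st2 : String × Int :=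
          (PySem.List.pyRange 0 10 1).foldl
            (fun st _ =>
              let c := if st.2 < n then "circle active" else "circle"
              (st.1 ++ "<div class='" ++ c ++ "'></div>", st.2 + 1))
            (st.1 ++ "<div class='ten-frame'>", st.2)
        (st2.1 ++ "</div>", st2.2))
      ("<div class='ten-frame-wrapper'>", 0)
  st.1 ++ "</div>"

-- ===== PORT B =====
-- ['…'] * active : `active` is a nonnegative Int here, so .toNat is exact.
def render_units_alt (n : Int) : String :=
  let frames : Int := max 1 (-(PySem.Int.floordiv (-n) 10))
  let total : Int := frames * 10
  let active : Int := max 0 (min total n)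
  let cells : List String :=
    List.replicate active.toNat "<div class='circle active'></div>" ++
    List.replicate (total - active).toNat "<div class='circle'></div>"
  let body : String :=
    PySem.Str.join "" ((PySem.List.pyRange 0 frames 1).map (fun k =>
      "<div class='ten-frame'>" ++
      PySem.Str.join "" (PySem.List.slice cells (some (10 * k)) (some (10 * k + 10))) ++
      "</div>"))
  "<div class='ten-frame-wrapper'>" ++ body ++ "</div>"

-- ===== PRECONDITION & SPEC =====
def Spec_render_units (n : Int) (out : String) : Prop := out = render_units_alt n
instance (n : Int) (out : String) : Decidable (Spec_render_units n out) := by unfold Spec_render_units; infer_instance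

-- ===== CLAIM (what is proved, stated in full; the proofs are below) =====
def Claim_equal_render_units : Prop := ∀ (n : Int), Dom_render_units n → Spec_render_units n (render_units n)

-- ===== LEMMAS AND PROOFS =====

/-- One circle cell of the grid, as A decomposes it. -/
def cellS (n i : Int) : String :=
  "<div class='" ++ (if i < n then "circle active" else "circle") ++ "'></div>"

/-- The ten cells of one frame whose first cell has index `d`. -/
def rowS (n d : Int) : String :=
  cellS n d ++ cellS n (d+1) ++ cellS n (d+2) ++ cellS n (d+3) ++ cellS n (d+4) ++
  cellS n (d+5) ++ cellS n (d+6) ++ cellS n (d+7) ++ cellS n (d+8) ++ cellS n (d+9)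

/-- One complete ten-frame starting at index `d`. -/
def frameS (n d : Int) : String := "<div class='ten-frame'>" ++ rowS n d ++ "</div>"

/-- `m` consecutive ten-frames starting at index `d`. -/
def framesS (n : Int) : Nat → Int → String
  | 0, _ => ""
  | m+1, d => frameS n d ++ framesS n m (d+10)

lemma cell_fused (n i : Int) :
    (if i < n then "<div class='circle active'></div>" else "<div class='circle'></div>")
      = cellS n i := by
  unfold cellS; split_ifs <;> decide

lemma range10 : List.range 10 = [0,1,2,3,4,5,6,7,8,9] := by decide

lemma pyRange10 : PySem.List.pyRange 0 10 1 = [0,1,2,3,4,5,6,7,8,9] := by decide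

lemma innerA (n : Int) (h : String) (d : Int) :
    (PySem.List.pyRange 0 10 1).foldl
      (fun st _ =>
        let c := if st.2 < n then "circle active" else "circle"
        (st.1 ++ "<div class='" ++ c ++ "'></div>", st.2 + 1)) (h, d)
      = (h ++ rowS n d, d + 10) := by
  rw [pyRange10]
  simp only [List.foldl, rowS, cellS]
  simp only [add_assoc, String.append_assoc]
  norm_num

lemma framesS_snoc (n : Int) (m : Nat) : ∀ d : Int,
    framesS n (m+1) d = framesS n m d ++ frameS n (d + 10 * m) := by
  induction m with
  | zero => intro d; simp [framesS]
  | succ m ih =>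
    intro d
    rw [show framesS n (m+1+1) d = frameS n d ++ framesS n (m+1) (d+10) from rfl, ih]
    simp [framesS, String.append_assoc]
    ring_nf

lemma outerA (n : Int) (m : Nat) : ∀ (h : String) (d : Int),
    (List.range m).foldl
      (fun st (_ : Nat) =>
        let st2 : String × Int :=
          (PySem.List.pyRange 0 10 1).foldl
            (fun st _ =>
              let c := if st.2 < n then "circle active" else "circle"
              (st.1 ++ "<div class='" ++ c ++ "'></div>", st.2 + 1))
            (st.1 ++ "<div class='ten-frame'>", st.2)
        (st2.1 ++ "</div>", st2.2)) (h, d)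
      = (h ++ framesS n m d, d + 10 * m) := by
  induction m with
  | zero => intro h d; simp [framesS]
  | succ m ih =>
    intro h d
    rw [List.range_succ, List.foldl_append, ih]
    simp only [List.foldl, innerA]
    rw [framesS_snoc]
    simp [frameS, String.append_assoc]
    ring

/-- A's result in canonical form. -/
lemma A_canon (n : Int) :
    render_units n =
      "<div class='ten-frame-wrapper'>" ++
        framesS n (max 1 (-(PySem.Int.floordiv (-n) 10))).toNat 0 ++ "</div>" := by
  have hfr : (if n == 0 then (1:Int) else max 1 (-(PySem.Int.floordiv (-n) 10)))
      = max 1 (-(PySem.Int.floordiv (-n) 10)) := by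
    by_cases h : n = 0
    · subst h; decide
    · simp [h]
  simp only [render_units, hfr]
  rw [PySem.List.pyRange_one 0 (max 1 (-PySem.Int.floordiv (-n) 10))]
  rw [List.foldl_map, sub_zero]
  rw [outerA]

lemma join_empty_nil : PySem.Str.join "" ([] : List String) = "" := by decide

lemma join_empty_cons (p : String) (rest : List String) :
    PySem.Str.join "" (p :: rest) = p ++ PySem.Str.join "" rest := by
  apply String.toList_inj.mp
  cases rest with
  | nil => simp [PySem.Str.toList_join, PySem.Chars.join_singleton, PySem.Chars.join_nil]
  | cons q r => simp [PySem.Str.toList_join, PySem.Chars.join_cons_cons]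

lemma cells_eq (n frames : Int) (hf : 1 ≤ frames) :
    List.replicate (max 0 (min (frames*10) n)).toNat "<div class='circle active'></div>" ++
    List.replicate ((frames*10 - max 0 (min (frames*10) n))).toNat "<div class='circle'></div>"
      = (List.range (frames*10).toNat).map
          (fun (i : Nat) => if (i : Int) < n then "<div class='circle active'></div>"
                    else "<div class='circle'></div>") := by
  set t := frames * 10 with ht
  set a := max 0 (min t n) with ha
  have h0a : 0 ≤ a := le_max_left _ _
  have hat : a ≤ t := by have : 0 ≤ t := by nlinarith
                         omega
  have hsplit : t.toNat = a.toNat + (t - a).toNat := by omega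
  rw [hsplit, List.range_add]
  rw [List.map_append, List.map_map]
  congr 1
  · rw [eq_comm, List.eq_replicate_iff]
    refine ⟨by simp, ?_⟩
    intro b hb
    simp only [List.mem_map, List.mem_range] at hb
    obtain ⟨i, hi, rfl⟩ := hb
    rw [if_pos]
    omega
  · rw [eq_comm, List.eq_replicate_iff]
    refine ⟨by simp, ?_⟩
    intro b hb
    simp only [List.mem_map, List.mem_range, Function.comp] at hb
    obtain ⟨i, hi, rfl⟩ := hb
    rw [if_neg]
    push_cast
    omega

lemma row_join (n : Int) (d : Int) :
    PySem.Str.join "" ((List.range 10).map (fun (j : Nat) => cellS n (d + (j:Int)))) = rowS n d := by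
  rw [range10]
  simp only [List.map_cons, List.map_nil, join_empty_cons, join_empty_nil]
  simp only [rowS]
  norm_num [String.append_assoc]

lemma B_frames (n : Int) (m : Nat) : ∀ base : Nat,
    PySem.Str.join "" ((List.range m).map (fun (k : Nat) =>
        "<div class='ten-frame'>" ++
        PySem.Str.join "" ((List.range 10).map (fun (j : Nat) => cellS n (10 * ((base : Int) + (k:Int)) + (j:Int)))) ++
        "</div>"))
      = framesS n m (10 * (base : Int)) := by
  induction m with
  | zero => intro base; simp [framesS, join_empty_nil]
  | succ m ih =>
    intro base
    rw [show List.range (m+1) = 0 :: (List.range m).map Nat.succ from List.range_succ_eq_map]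
    rw [List.map_cons, List.map_map, join_empty_cons]
    have h1 : (List.range m).map ((fun (k : Nat) => ("<div class='ten-frame'>" ++
        PySem.Str.join "" ((List.range 10).map (fun (j : Nat) => cellS n (10 * ((base : Int) + (k:Int)) + (j:Int)))) ++
        "</div>")) ∘ Nat.succ)
        = (List.range m).map (fun (k : Nat) => ("<div class='ten-frame'>" ++
        PySem.Str.join "" ((List.range 10).map (fun (j : Nat) => cellS n (10 * (((base+1 : Nat) : Int) + (k:Int)) + (j:Int)))) ++
        "</div>")) := by
      apply List.map_congr_left
      intro k _
      simp only [Function.comp_apply, Nat.succ_eq_add_one]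
      rw [show 10 * ((base:Int) + (((k+1 : Nat)):Int)) = 10 * ((((base+1 : Nat)):Int) + (k:Int)) from by push_cast; ring]
    rw [h1, ih (base+1)]
    rw [show framesS n (m+1) (10*(base:Int)) = frameS n (10*(base:Int)) ++ framesS n m (10*(base:Int)+10) from rfl]
    rw [frameS, ← row_join n (10*(base:Int))]
    rw [show (10*(((base+1):Nat):Int)) = 10*(base:Int)+10 from by push_cast; ring]
    norm_num

lemma chunk (f : Nat → String) (m k : Nat) (hk : k < m) :
    ((((List.range (10*m)).map f).drop (10*k)).take 10) = (List.range 10).map (fun j => f (10*k + j)) := by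
  have hsplit : 10*m = 10*k + (10*m - 10*k) := by omega
  rw [hsplit, List.range_add, List.map_append]
  rw [List.drop_left' (by simp)]
  rw [List.map_map, ← List.map_take, List.take_range, Nat.min_eq_left (by omega)]
  rfl

lemma B_frames0 (n : Int) (m : Nat) :
    PySem.Str.join "" ((List.range m).map (fun (k : Nat) =>
        "<div class='ten-frame'>" ++
        PySem.Str.join "" ((List.range 10).map (fun (j : Nat) => cellS n ((10 * k + j : Nat) : Int))) ++
        "</div>"))
      = framesS n m 0 := by
  have h := B_frames n m 0
  norm_num at h
  rw [← h]
  congr 1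

/-- B's result in canonical form. -/
lemma B_canon (n : Int) :
    render_units_alt n =
      "<div class='ten-frame-wrapper'>" ++
        framesS n (max 1 (-(PySem.Int.floordiv (-n) 10))).toNat 0 ++ "</div>" := by
  simp only [render_units_alt]
  set M : Int := max 1 (-(PySem.Int.floordiv (-n) 10)) with hM
  have hM1 : (1:Int) ≤ M := le_max_left _ _
  rw [cells_eq n M hM1]
  rw [PySem.List.pyRange_one 0 M, sub_zero, List.map_map]
  rw [show (M*10).toNat = 10 * M.toNat from by omega]
  congr 2
  rw [← B_frames0 n M.toNat]
  apply congrArg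
  apply List.map_congr_left
  intro k hk
  simp only [Function.comp_apply, zero_add, List.mem_range] at hk ⊢
  congr 1
  congr 1
  rw [show (10*(k:Int)) = ((10*k : Nat):Int) from by push_cast; ring]
  rw [show ((10*k:Nat):Int) + 10 = ((10*k:Nat):Int) + ((10:Nat):Int) from by norm_num]
  rw [PySem.List.slice_natCast_add]
  rw [chunk _ M.toNat k hk]
  apply congrArg
  apply List.map_congr_left
  intro j _
  rw [cell_fused]

-- ===== VERDICT (by name: the statement is the Claim_ definition above) =====
theorem render_units_spec : Claim_equal_render_units := by
  intro n _
  unfold Spec_render_units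
  rw [A_canon, B_canon]
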